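-- pv_equiv track=rewrite | github.com/joshua-cheng2210/CSCI-1133 | hw05.py | longest_even
-- ===== SOURCE A (Python) =====
-- def longest_even(shows):
--     '''
--     Purpose:
--         find out Kai's favourite show
--     Parameter(s):
--         shows: a list of possible shows
--     Return Value:
--         return favourite show - longest even show name
--     '''
--     length = 0
--     fav_show = ""
--     for show in shows:
--         if (len(show) > length and len(show) % 2 == 0):
--             fav_show = show
--             length = len(show)
--
--     return fav_show
-- ===== SOURCE B (Python) =====
-- def longest_even(shows):
--     # pass 1: the target length = maximum even length occurring (0 if none)
--     best = max((len(s) for s in shows if len(s) % 2 == 0), default=0)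
--     if best == 0:
--         return ""
--     # pass 2: retrieve the first string of that length (it is even by construction)
--     for s in shows:
--         if len(s) == best:
--             return s
--     return ""  # unreachable: best is attained in shows
-- ===== Notes on version B (the rewrite author's own statement) =====
-- stated objective: alternative
-- what changed: Replaces the running-argmax scan by two staged passes: first compute the maximal even length as an integer max over the projected lengths, then a separate linear search returns the first string of that length (empty string when the max is 0).
import Mathlib
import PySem

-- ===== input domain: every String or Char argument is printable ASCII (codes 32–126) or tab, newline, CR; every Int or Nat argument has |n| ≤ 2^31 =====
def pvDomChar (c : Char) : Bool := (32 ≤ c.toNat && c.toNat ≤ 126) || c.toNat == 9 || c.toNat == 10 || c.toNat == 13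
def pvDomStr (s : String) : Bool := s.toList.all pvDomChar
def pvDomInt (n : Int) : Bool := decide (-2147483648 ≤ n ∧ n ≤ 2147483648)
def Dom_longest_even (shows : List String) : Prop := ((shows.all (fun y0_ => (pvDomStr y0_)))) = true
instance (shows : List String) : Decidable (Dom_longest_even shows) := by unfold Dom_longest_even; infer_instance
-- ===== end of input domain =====

-- B computes the maximal even length first (an integer max over projected lengths) and then a second pass retrieves the first string of that length: a staged key-then-lookup decomposition instead of A's running-argmax scan, same cost.


-- ===== PORT A =====
def longest_even (shows : List String) : String :=
  (shows.foldl
    (fun (st : Int × String) sh =>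
      if PySem.Str.len sh > st.1 ∧ PySem.Int.mod (PySem.Str.len sh) 2 = 0
      then (PySem.Str.len sh, sh) else st)
    (0, "")).2

-- ===== PORT B =====
-- pass 1: best = maximal even length (default 0); pass 2: first string of that length;
-- the final `none => ""` branch mirrors Source B's unreachable fall-through return.
def longest_even_alt (shows : List String) : String :=
  let best := PySem.List.maxD
    ((shows.filter (fun s => decide (PySem.Int.mod (PySem.Str.len s) 2 = 0))).map PySem.Str.len)
    (fun y => y) 0
  if best = 0 then ""
  else
    match shows.find? (fun s => PySem.Str.len s == best) with
    | some s => s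
    | none => ""

-- ===== PRECONDITION & SPEC =====
def Spec_longest_even (shows : List String) (out : String) : Prop := out = longest_even_alt shows
instance (shows : List String) (out : String) : Decidable (Spec_longest_even shows out) := by unfold Spec_longest_even; infer_instance

-- ===== CLAIM (what is proved, stated in full; the proofs are below) =====
def Claim_equal_longest_even : Prop := ∀ (shows : List String), Dom_longest_even shows → Spec_longest_even shows (longest_even shows)

-- ===== LEMMAS AND PROOFS =====

theorem pv_len_nonneg (s : String) : 0 ≤ PySem.Str.len s := by
  rw [PySem.Str.len_eq]; exact_mod_cast Nat.zero_le _

-- A's loop step, named so lemmas can talk about it (definitionally A's lambda)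
def pvStepA (st : Int × String) (sh : String) : Int × String :=
  if PySem.Str.len sh > st.1 ∧ PySem.Int.mod (PySem.Str.len sh) 2 = 0
  then (PySem.Str.len sh, sh) else st

-- the maximal even length occurring in l (0 if none), as a structural recursion
def pvEmax (l : List String) : Int :=
  l.foldr (fun s m => if PySem.Int.mod (PySem.Str.len s) 2 = 0 then max (PySem.Str.len s) m else m) 0

theorem pv_emax_cons (x : String) (t : List String) :
    pvEmax (x :: t)
    = if PySem.Int.mod (PySem.Str.len x) 2 = 0 then max (PySem.Str.len x) (pvEmax t) else pvEmax t := rfl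

theorem pv_emax_nonneg (l : List String) : 0 ≤ pvEmax l := by
  induction l with
  | nil => exact le_refl 0
  | cons x t ih =>
    rw [pv_emax_cons]; split_ifs with h
    · exact le_trans ih (le_max_right _ _)
    · exact ih

-- B's pass-2 predicate strengthened with parity (what characterises A's favourite)
def pvPA (e : Int) (s : String) : Bool :=
  decide (PySem.Int.mod (PySem.Str.len s) 2 = 0) && (PySem.Str.len s == e)

theorem pvPA_eq (e : Int) (x : String) :
    pvPA e x = true ↔ (PySem.Int.mod (PySem.Str.len x) 2 = 0 ∧ PySem.Str.len x = e) := by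
  unfold pvPA; rw [Bool.and_eq_true, decide_eq_true_iff, beq_iff_eq]

theorem pvPA_false_of_ne {e : Int} {x : String} (h : PySem.Str.len x ≠ e) : pvPA e x = false := by
  unfold pvPA
  rw [beq_eq_false_iff_ne.mpr h, Bool.and_false]

theorem pvPA_false_of_odd {e : Int} {x : String} (h : ¬ PySem.Int.mod (PySem.Str.len x) 2 = 0) :
    pvPA e x = false := by
  unfold pvPA
  rw [decide_eq_false h, Bool.false_and]

theorem pv_attained (l : List String) : 0 < pvEmax l →
    ∃ r, l.find? (pvPA (pvEmax l)) = some r := by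
  induction l with
  | nil => intro h; simp [pvEmax] at h
  | cons x t ih =>
    intro h
    by_cases hp : PySem.Int.mod (PySem.Str.len x) 2 = 0
    · have hE : pvEmax (x :: t) = max (PySem.Str.len x) (pvEmax t) := by
        rw [pv_emax_cons, if_pos hp]
      by_cases he : PySem.Str.len x = pvEmax (x :: t)
      · exact ⟨x, List.find?_cons_of_pos ((pvPA_eq _ _).mpr ⟨hp, he⟩)⟩
      · have hEt : pvEmax (x :: t) = pvEmax t := by rw [hE]; rw [hE] at he; omega
        rw [List.find?_cons_of_neg (by rw [pvPA_false_of_ne he]; exact Bool.false_ne_true)]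
        rw [hEt] at h ⊢
        exact ih h
    · have hEt : pvEmax (x :: t) = pvEmax t := by rw [pv_emax_cons, if_neg hp]
      rw [List.find?_cons_of_neg (by rw [pvPA_false_of_odd hp]; exact Bool.false_ne_true)]
      rw [hEt] at h ⊢
      exact ih h

theorem pv_even (l : List String) (h : 0 < pvEmax l) : PySem.Int.mod (pvEmax l) 2 = 0 := by
  obtain ⟨r, hr⟩ := pv_attained l h
  obtain ⟨h1, h2⟩ := (pvPA_eq _ _).mp (List.find?_some hr)
  rw [← h2]; exact h1

-- A's loop never updates once the state length dominates every even length
theorem pv_A_stay (l : List String) : ∀ (m : Int) (f0 : String), pvEmax l ≤ m →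
    l.foldl pvStepA (m, f0) = (m, f0) := by
  induction l with
  | nil => intro m f0 _; rfl
  | cons x t ih =>
    intro m f0 h
    rw [pv_emax_cons] at h
    rw [List.foldl_cons]
    by_cases hp : PySem.Int.mod (PySem.Str.len x) 2 = 0
    · rw [if_pos hp] at h
      have hx : ¬ (PySem.Str.len x > m) := by
        have := le_max_left (PySem.Str.len x) (pvEmax t); omega
      have hstep : pvStepA (m, f0) x = (m, f0) := by
        simp only [pvStepA]; rw [if_neg (fun hc => hx hc.1)]
      rw [hstep]
      exact ih m f0 (by have := le_max_right (PySem.Str.len x) (pvEmax t); omega)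
    · rw [if_neg hp] at h
      have hstep : pvStepA (m, f0) x = (m, f0) := by
        simp only [pvStepA]; rw [if_neg (fun hc => hp hc.2)]
      rw [hstep]
      exact ih m f0 h

-- characterisation of A's loop when some even length beats the state
theorem pv_A_move (l : List String) : ∀ (m : Int) (f0 : String), 0 ≤ m → m < pvEmax l →
    l.foldl pvStepA (m, f0) = (pvEmax l, (l.find? (pvPA (pvEmax l))).getD f0) := by
  induction l with
  | nil => intro m f0 _ h; simp [pvEmax] at h; omega
  | cons x t ih =>
    intro m f0 h0 h
    rw [List.foldl_cons]
    by_cases hp : PySem.Int.mod (PySem.Str.len x) 2 = 0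
    · have hE : pvEmax (x :: t) = max (PySem.Str.len x) (pvEmax t) := by
        rw [pv_emax_cons, if_pos hp]
      by_cases hgt : PySem.Str.len x > m
      · have hstep : pvStepA (m, f0) x = (PySem.Str.len x, x) := by
          simp only [pvStepA]; rw [if_pos ⟨hgt, hp⟩]
        rw [hstep]
        rcases le_or_gt (pvEmax t) (PySem.Str.len x) with hle | hlt
        · have hEx : pvEmax (x :: t) = PySem.Str.len x := by rw [hE]; omega
          rw [pv_A_stay t (PySem.Str.len x) x hle]
          rw [List.find?_cons_of_pos ((pvPA_eq _ _).mpr ⟨hp, hEx.symm⟩), hEx]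
          rfl
        · have hEt : pvEmax (x :: t) = pvEmax t := by rw [hE]; omega
          rw [ih (PySem.Str.len x) x (pv_len_nonneg x) hlt]
          have hx : pvPA (pvEmax t) x = false := pvPA_false_of_ne (by omega)
          rw [hEt, List.find?_cons_of_neg (by rw [hx]; exact Bool.false_ne_true)]
          obtain ⟨r, hr⟩ := pv_attained t (lt_of_le_of_lt (pv_len_nonneg x) hlt)
          rw [hr]
          rfl
      · have hstep : pvStepA (m, f0) x = (m, f0) := by
          simp only [pvStepA]; rw [if_neg (fun hc => hgt hc.1)]
        have hb : m < pvEmax t := by rw [hE] at h; omega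
        have hEt : pvEmax (x :: t) = pvEmax t := by rw [hE]; omega
        rw [hstep, ih m f0 h0 hb, hEt]
        have hx : pvPA (pvEmax t) x = false := pvPA_false_of_ne (by omega)
        rw [List.find?_cons_of_neg (by rw [hx]; exact Bool.false_ne_true)]
    · have hEt : pvEmax (x :: t) = pvEmax t := by rw [pv_emax_cons, if_neg hp]
      have hstep : pvStepA (m, f0) x = (m, f0) := by
        simp only [pvStepA]; rw [if_neg (fun hc => hp hc.2)]
      rw [hEt] at h
      rw [hstep, ih m f0 h0 h, hEt]
      rw [List.find?_cons_of_neg (by rw [pvPA_false_of_odd hp]; exact Bool.false_ne_true)]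

-- a left running max of nonnegatives equals max of the seed with the foldr max
theorem pv_foldl_max_foldr (t : List Int) : ∀ a : Int, 0 ≤ a → (∀ x ∈ t, 0 ≤ x) →
    t.foldl max a = max a (t.foldr max 0) := by
  induction t with
  | nil => intro a ha _; simp; omega
  | cons x t' ih =>
    intro a ha hall
    rw [List.foldl_cons, List.foldr_cons]
    rw [ih (max a x) (by have := hall x (by simp); omega)
        (fun y hy => hall y (by simp [hy]))]
    omega

theorem pv_emax_foldr (l : List String) :
    ((l.filter (fun s => decide (PySem.Int.mod (PySem.Str.len s) 2 = 0))).map PySem.Str.len).foldr max 0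
    = pvEmax l := by
  induction l with
  | nil => rfl
  | cons x t ih =>
    rw [pv_emax_cons, List.filter_cons]
    by_cases hp : PySem.Int.mod (PySem.Str.len x) 2 = 0
    · rw [if_pos (by simpa using hp), if_pos hp, List.map_cons, List.foldr_cons, ih]
    · rw [if_neg (by simpa using hp), if_neg hp, ih]

-- B's pass 1 computes pvEmax
theorem pv_best_eq (l : List String) :
    PySem.List.maxD
      ((l.filter (fun s => decide (PySem.Int.mod (PySem.Str.len s) 2 = 0))).map PySem.Str.len)
      (fun y => y) 0
    = pvEmax l := by
  rw [← pv_emax_foldr l]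
  cases hL : (l.filter (fun s => decide (PySem.Int.mod (PySem.Str.len s) 2 = 0))).map PySem.Str.len with
  | nil => rfl
  | cons a L' =>
    have hnn : ∀ x ∈ a :: L', 0 ≤ x := by
      intro x hx
      rw [← hL] at hx
      obtain ⟨s, _, hs⟩ := List.mem_map.mp hx
      rw [← hs]; exact pv_len_nonneg s
    unfold PySem.List.maxD
    rw [PySem.List.max?_id_cons]
    rw [pv_foldl_max_foldr L' a (hnn a (by simp)) (fun x hx => hnn x (by simp [hx]))]
    rw [List.foldr_cons]
    rfl

-- ===== VERDICT (by name: the statement is the Claim_ definition above) =====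
theorem longest_even_spec : Claim_equal_longest_even := by
  intro shows _
  unfold Spec_longest_even longest_even longest_even_alt
  have hA : shows.foldl
      (fun (st : Int × String) sh =>
        if PySem.Str.len sh > st.1 ∧ PySem.Int.mod (PySem.Str.len sh) 2 = 0
        then (PySem.Str.len sh, sh) else st) (0, "")
      = shows.foldl pvStepA (0, "") := rfl
  rw [hA]
  simp only [pv_best_eq]
  rcases lt_or_eq_of_le (pv_emax_nonneg shows) with hpos | hz
  · rw [pv_A_move shows 0 "" (le_refl 0) hpos]
    rw [if_neg (by omega)]
    have hpe : pvPA (pvEmax shows) = (fun s => PySem.Str.len s == pvEmax shows) := by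
      funext s
      by_cases hq : PySem.Str.len s = pvEmax shows
      · rw [(pvPA_eq _ _).mpr ⟨by rw [hq]; exact pv_even shows hpos, hq⟩,
            beq_iff_eq.mpr hq]
      · rw [pvPA_false_of_ne hq, beq_eq_false_iff_ne.mpr hq]
    rw [hpe]
    cases hf : shows.find? (fun s => PySem.Str.len s == pvEmax shows) with
    | none => rfl
    | some r => rfl
  · rw [pv_A_stay shows 0 "" (by omega)]
    rw [if_pos hz.symm]
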